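-- pv_equiv track=rewrite | github.com/withNoclout/LeetCode-Med | quiz_highestRankedItem.py | highestRankedKItems
-- ===== SOURCE A (Python) =====
-- from collections import deque
--
-- def highestRankedKItems(grid, pricing, start, k):
--     m, n = len(grid), len(grid[0])
--     lo, hi = pricing
--     sr, sc = start
--     if grid[sr][sc] == 0:
--         return []
--
--     dist = [[-1] * n for _ in range(m)]
--     dist[sr][sc] = 0
--     q = deque([(sr, sc)])
--     candidates = []
--
--     while q:
--         r, c = q.popleft()
--         val = grid[r][c]
--         if val > 1 and lo <= val <= hi:
--             candidates.append((dist[r][c], val, r, c))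
--         for dr, dc in ((1,0), (-1,0), (0,1), (0,-1)):
--             nr, nc = r + dr, c + dc
--             if 0 <= nr < m and 0 <= nc < n and grid[nr][nc] != 0 and dist[nr][nc] == -1:
--                 dist[nr][nc] = dist[r][c] + 1
--                 q.append((nr, nc))
--
--     candidates.sort()  # sorts by (distance, price, row, col)
--     return [[r, c] for _, _, r, c in candidates[:k]]
-- ===== SOURCE B (Python) =====
-- def highestRankedKItems(grid, pricing, start, k):
--     # Level-by-level BFS: each distance layer is sorted on its own by
--     # (price, row, col) and appended; the global 4-key sort disappears.
--     m, n = len(grid), len(grid[0])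
--     lo, hi = pricing
--     sr, sc = start
--     if grid[sr][sc] == 0:
--         return []
--
--     dist = [[-1] * n for _ in range(m)]
--     dist[sr][sc] = 0
--     frontier = [(sr, sc)]
--     res = []
--     while frontier:
--         layer = []
--         nxt = []
--         for r, c in frontier:
--             val = grid[r][c]
--             if val > 1 and lo <= val <= hi:
--                 layer.append((val, r, c))
--             for dr, dc in ((1, 0), (-1, 0), (0, 1), (0, -1)):
--                 nr, nc = r + dr, c + dc
--                 if 0 <= nr < m and 0 <= nc < n and grid[nr][nc] != 0 and dist[nr][nc] == -1:
--                     dist[nr][nc] = dist[r][c] + 1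
--                     nxt.append((nr, nc))
--         layer.sort()
--         res.extend([r, c] for _, r, c in layer)
--         frontier = nxt
--     return res[:k]
-- ===== Notes on version B (the rewrite author's own statement) =====
-- stated objective: alternative
-- what changed: Replaces A's single global sort of (distance,price,row,col) 4-tuples collected by a deque BFS with a level-by-level BFS that sorts each distance layer on its own by (price,row,col) and concatenates the layers in distance order, truncating to k at the end.
-- outside the precondition, e.g. on highestRankedKItems([[1], [2, 9]], [2, 2], [0, 0], 5): A returns [[1, 0]], B returns [[1, 0]]
import Mathlib
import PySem

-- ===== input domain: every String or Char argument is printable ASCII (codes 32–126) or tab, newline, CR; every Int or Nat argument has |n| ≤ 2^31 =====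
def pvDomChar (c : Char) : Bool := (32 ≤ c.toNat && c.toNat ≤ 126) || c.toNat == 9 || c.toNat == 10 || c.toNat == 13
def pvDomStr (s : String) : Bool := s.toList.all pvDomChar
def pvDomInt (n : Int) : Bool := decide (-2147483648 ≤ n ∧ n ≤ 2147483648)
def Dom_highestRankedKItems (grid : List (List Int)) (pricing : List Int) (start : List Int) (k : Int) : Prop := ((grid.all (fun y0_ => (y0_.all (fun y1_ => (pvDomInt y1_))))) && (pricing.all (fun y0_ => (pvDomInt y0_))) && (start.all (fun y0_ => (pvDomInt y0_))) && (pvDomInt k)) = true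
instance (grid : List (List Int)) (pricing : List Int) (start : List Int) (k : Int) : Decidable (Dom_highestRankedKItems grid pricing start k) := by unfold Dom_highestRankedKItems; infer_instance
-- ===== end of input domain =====

-- B replaces A's single global sort of (distance, price, row, col) BFS candidates by a
-- level-by-level BFS whose distance layers are each sorted alone by (price, row, col) and
-- concatenated in distance order; equal output, no speed claim.

-- ===== PORT A =====
-- 2-D read/write dist[r][c] / grid[r][c] with Python index semantics (negative indices wrap;
-- the .getD defaults are never reached on Pre_ inputs, where every access is in range).

def mget (g : List (List Int)) (r c : Int) : Int :=
  (PySem.List.pyGet? ((PySem.List.pyGet? g r).getD []) c).getD 0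

def mset (g : List (List Int)) (r c : Int) (v : Int) : List (List Int) :=
  PySem.List.pySetD g r (PySem.List.pySetD ((PySem.List.pyGet? g r).getD []) c v)

def dirs : List (Int × Int) := [(1, 0), (-1, 0), (0, 1), (0, -1)]

def nstep (grid : List (List Int)) (m n r c : Int)
    (st : List (List Int) × List (Int × Int)) (dd : Int × Int) :
    List (List Int) × List (Int × Int) :=
  let nr := r + dd.1
  let nc := c + dd.2
  if 0 ≤ nr ∧ nr < m ∧ 0 ≤ nc ∧ nc < n ∧ mget grid nr nc ≠ 0 ∧ mget st.1 nr nc = -1 then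
    (mset st.1 nr nc (mget st.1 r c + 1), st.2 ++ [(nr, nc)])
  else st

def nbrs (grid : List (List Int)) (m n r c : Int) (dist : List (List Int)) :
    List (List Int) × List (Int × Int) :=
  dirs.foldl (nstep grid m n r c) (dist, [])

def key4 (t : Int × Int × Int × Int) : Lex (Int × Lex (Int × Lex (Int × Int))) :=
  toLex (t.1, toLex (t.2.1, toLex (t.2.2.1, t.2.2.2)))

def bfsA (grid : List (List Int)) (m n lo hi : Int) :
    Nat → List (List Int) → List (Int × Int) → List (Int × Int × Int × Int) →
    List (Int × Int × Int × Int)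
  | 0, _, _, cands => cands
  | fuel + 1, dist, q, cands =>
    match q with
    | [] => cands
    | (r, c) :: rest =>
      let val := mget grid r c
      let cands' := if 1 < val ∧ lo ≤ val ∧ val ≤ hi then
          cands ++ [(mget dist r c, val, r, c)] else cands
      let st := nbrs grid m n r c dist
      bfsA grid m n lo hi fuel st.1 (rest ++ st.2) cands'

def highestRankedKItems (grid : List (List Int)) (pricing : List Int) (start : List Int) (k : Int) : List (List Int) :=
  let m : Int := grid.length
  let n : Int := ((PySem.List.pyGet? grid 0).getD []).length
  let lo := PySem.List.pyGetD pricing 0 0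
  let hi := PySem.List.pyGetD pricing 1 0
  let sr := PySem.List.pyGetD start 0 0
  let sc := PySem.List.pyGetD start 1 0
  if mget grid sr sc = 0 then []
  else
    let dist0 := List.replicate m.toNat (List.replicate n.toNat (-1 : Int))
    let dist1 := mset dist0 sr sc 0
    let cands := bfsA grid m n lo hi (m.toNat * n.toNat + 1) dist1 [(sr, sc)] []
    (PySem.List.slice (PySem.List.sorted cands key4) none (some k)).map
      (fun t => [t.2.2.1, t.2.2.2])

-- ===== PORT B =====
def key3 (t : Int × Int × Int) : Lex (Int × Lex (Int × Int)) :=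
  toLex (t.1, toLex (t.2.1, t.2.2))

def cellStep (grid : List (List Int)) (m n lo hi : Int)
    (st : List (List Int) × List (Int × Int) × List (Int × Int × Int)) (cell : Int × Int) :
    List (List Int) × List (Int × Int) × List (Int × Int × Int) :=
  let r := cell.1
  let c := cell.2
  let val := mget grid r c
  let items := if 1 < val ∧ lo ≤ val ∧ val ≤ hi then st.2.2 ++ [(val, r, c)] else st.2.2
  let nb := nbrs grid m n r c st.1
  (nb.1, st.2.1 ++ nb.2, items)

def processLayer (grid : List (List Int)) (m n lo hi : Int)
    (dist : List (List Int)) (frontier : List (Int × Int)) :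
    List (List Int) × List (Int × Int) × List (Int × Int × Int) :=
  frontier.foldl (cellStep grid m n lo hi) (dist, [], [])

def layersB (grid : List (List Int)) (m n lo hi : Int) :
    Nat → List (List Int) → List (Int × Int) → List (List Int) → List (List Int)
  | 0, _, _, res => res
  | fuel + 1, dist, frontier, res =>
    if frontier.isEmpty then res
    else
      layersB grid m n lo hi fuel (processLayer grid m n lo hi dist frontier).1
        (processLayer grid m n lo hi dist frontier).2.1
        (res ++ (PySem.List.sorted (processLayer grid m n lo hi dist frontier).2.2 key3).map
          (fun t => [t.2.1, t.2.2]))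

def highestRankedKItems_alt (grid : List (List Int)) (pricing : List Int) (start : List Int) (k : Int) : List (List Int) :=
  let m : Int := grid.length
  let n : Int := ((PySem.List.pyGet? grid 0).getD []).length
  let lo := PySem.List.pyGetD pricing 0 0
  let hi := PySem.List.pyGetD pricing 1 0
  let sr := PySem.List.pyGetD start 0 0
  let sc := PySem.List.pyGetD start 1 0
  if mget grid sr sc = 0 then []
  else
    let dist0 := List.replicate m.toNat (List.replicate n.toNat (-1 : Int))
    let dist1 := mset dist0 sr sc 0
    PySem.List.slice
      (layersB grid m n lo hi (m.toNat * n.toNat + 1) dist1 [(sr, sc)] []) none (some k)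

-- ===== PRECONDITION & SPEC =====
-- Pre_ = where Python A returns normally: a non-empty RECTANGULAR grid (on a ragged grid
-- whether A raises IndexError depends on BFS reachability of a short row, which is not a
-- closed-form condition on the input, so ragged grids are excluded although A returns on
-- some of them), pricing and start of length 2, and a start index Python accepts
-- (negative wraparound indices included).
def Pre_highestRankedKItems (grid : List (List Int)) (pricing : List Int) (start : List Int) (k : Int) : Prop :=
  grid ≠ [] ∧
  (∀ row ∈ grid, row.length = ((PySem.List.pyGet? grid 0).getD []).length) ∧
  1 ≤ ((PySem.List.pyGet? grid 0).getD []).length ∧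
  pricing.length = 2 ∧ start.length = 2 ∧
  PySem.Raise.InRange grid.length (PySem.List.pyGetD start 0 0) ∧
  PySem.Raise.InRange ((PySem.List.pyGet? grid 0).getD []).length (PySem.List.pyGetD start 1 0)
instance (grid : List (List Int)) (pricing : List Int) (start : List Int) (k : Int) : Decidable (Pre_highestRankedKItems grid pricing start k) := by unfold Pre_highestRankedKItems; infer_instance

def pvWitness_highestRankedKItems : List (List Int) × List Int × List Int × Int :=
  ([[1, 2]], [2, 2], [0, 0], 1)

def Spec_highestRankedKItems (grid : List (List Int)) (pricing : List Int) (start : List Int) (k : Int) (out : List (List Int)) : Prop := out = highestRankedKItems_alt grid pricing start k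
instance (grid : List (List Int)) (pricing : List Int) (start : List Int) (k : Int) (out : List (List Int)) : Decidable (Spec_highestRankedKItems grid pricing start k out) := by unfold Spec_highestRankedKItems; infer_instance

-- ===== CLAIM (what is proved, stated in full; the proofs are below) =====
def Claim_equal_highestRankedKItems : Prop := ∀ (grid : List (List Int)) (pricing : List Int) (start : List Int) (k : Int), Dom_highestRankedKItems grid pricing start k → Pre_highestRankedKItems grid pricing start k → Spec_highestRankedKItems grid pricing start k (highestRankedKItems grid pricing start k)

-- ===== LEMMAS AND PROOFS =====

theorem pyIdx?_lt {n : Nat} {i : Int} {k : Nat} (h : PySem.List.pyIdx? n i = some k) : k < n := by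
  unfold PySem.List.pyIdx? at h
  split_ifs at h <;> simp_all <;> omega

theorem pyGet?_eq (xs : List Int) (i : Int) :
    PySem.List.pyGet? xs i = (PySem.List.pyIdx? xs.length i).bind fun k => xs[k]? := rfl

theorem pyGet?_eq' (xs : List (List Int)) (i : Int) :
    PySem.List.pyGet? xs i = (PySem.List.pyIdx? xs.length i).bind fun k => xs[k]? := rfl

theorem pyIdx?_zero (i : Int) : PySem.List.pyIdx? 0 i = none := by
  unfold PySem.List.pyIdx?; split_ifs <;> simp_all <;> omega

theorem pySetD_some {α : Type} (xs : List α) (i : Int) (v : α) (k : Nat)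
    (h : PySem.List.pyIdx? xs.length i = some k) :
    PySem.List.pySetD xs i v = xs.set k v := by
  simp [PySem.List.pySetD, PySem.List.pySet?, h]

theorem pySetD_none {α : Type} (xs : List α) (i : Int) (v : α)
    (h : PySem.List.pyIdx? xs.length i = none) :
    PySem.List.pySetD xs i v = xs := by
  simp [PySem.List.pySetD, PySem.List.pySet?, h]

def loc (g : List (List Int)) (r c : Int) : Option (Nat × Nat) :=
  (PySem.List.pyIdx? g.length r).bind fun i =>
    (PySem.List.pyIdx? ((g[i]?.getD []).length) c).map fun j => (i, j)

def cnt (g : List (List Int)) : Nat := (g.map (fun row => row.count (-1))).sum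

theorem mget_loc (g : List (List Int)) (r c : Int) (i j : Nat) (h : loc g r c = some (i, j)) :
    mget g r c = ((g[i]?.getD [])[j]?.getD 0) := by
  unfold loc at h
  cases hr : PySem.List.pyIdx? g.length r with
  | none => simp [hr] at h
  | some i' =>
    simp only [hr, Option.bind_some] at h
    cases hc : PySem.List.pyIdx? ((g[i']?.getD []).length) c with
    | none => simp [hc] at h
    | some j' =>
      simp only [hc, Option.map_some] at h
      obtain ⟨rfl, rfl⟩ : i' = i ∧ j' = j := by simpa using h
      have hi := pyIdx?_lt hr
      unfold mget
      rw [pyGet?_eq', hr]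
      simp only [Option.bind_some]
      rw [List.getElem?_eq_getElem hi]
      simp only [Option.getD_some]
      rw [pyGet?_eq]
      have hrow : g[i']?.getD [] = g[i'] := by simp [List.getElem?_eq_getElem hi]
      rw [hrow] at hc
      rw [hc]
      simp

theorem mget_loc_none (g : List (List Int)) (r c : Int) (h : loc g r c = none) :
    mget g r c = 0 := by
  unfold loc at h
  cases hr : PySem.List.pyIdx? g.length r with
  | none =>
    unfold mget
    rw [pyGet?_eq', hr]
    simp [pyGet?_eq, pyIdx?_zero]
  | some i =>
    simp only [hr, Option.bind_some] at h
    cases hc : PySem.List.pyIdx? ((g[i]?.getD []).length) c with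
    | none =>
      have hi := pyIdx?_lt hr
      unfold mget
      rw [pyGet?_eq', hr]
      simp only [Option.bind_some]
      rw [List.getElem?_eq_getElem hi]
      simp only [Option.getD_some]
      rw [pyGet?_eq]
      have : g[i]?.getD [] = g[i] := by simp [List.getElem?_eq_getElem hi]
      rw [this] at hc
      rw [hc]
      simp
    | some j => simp [hc] at h

theorem loc_resolve (g : List (List Int)) (r c : Int) (i j : Nat) (h : loc g r c = some (i, j)) :
    PySem.List.pyIdx? g.length r = some i ∧ i < g.length ∧
      PySem.List.pyIdx? (g[i]?.getD []).length c = some j ∧ j < (g[i]?.getD []).length := by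
  unfold loc at h
  cases hr : PySem.List.pyIdx? g.length r with
  | none => simp [hr] at h
  | some i' =>
    simp only [hr, Option.bind_some] at h
    cases hc : PySem.List.pyIdx? ((g[i']?.getD []).length) c with
    | none => simp [hc] at h
    | some j' =>
      simp only [hc, Option.map_some] at h
      obtain ⟨e1, e2⟩ : i' = i ∧ j' = j := by simpa using h
      subst e1; subst e2
      exact ⟨rfl, pyIdx?_lt hr, hc, pyIdx?_lt hc⟩

theorem mset_eq_set (g : List (List Int)) (r c v : Int) (i j : Nat)
    (h : loc g r c = some (i, j)) :
    mset g r c v = g.set i ((g[i]?.getD []).set j v) := by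
  obtain ⟨hr, hi, hc, hj⟩ := loc_resolve g r c i j h
  unfold mset
  rw [pyGet?_eq', hr]
  simp only [Option.bind_some]
  rw [pySetD_some _ _ _ _ hc]
  exact pySetD_some _ _ _ _ (by simpa [List.length_set] using hr)

theorem mset_loc_none (g : List (List Int)) (r c v : Int) (h : loc g r c = none) :
    mset g r c v = g := by
  unfold loc at h
  cases hr : PySem.List.pyIdx? g.length r with
  | none => unfold mset; exact pySetD_none _ _ _ hr
  | some i =>
    simp only [hr, Option.bind_some] at h
    cases hc : PySem.List.pyIdx? ((g[i]?.getD []).length) c with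
    | some j => simp [hc] at h
    | none =>
      have hi := pyIdx?_lt hr
      have hrow : g[i]?.getD [] = g[i] := by simp [List.getElem?_eq_getElem hi]
      unfold mset
      rw [pyGet?_eq', hr]
      simp only [Option.bind_some]
      rw [List.getElem?_eq_getElem hi]
      simp only [Option.getD_some]
      rw [hrow] at hc
      rw [pySetD_none _ _ _ hc]
      rw [pySetD_some _ _ _ _ hr]
      exact List.set_getElem_self hi

theorem mset_shape (g : List (List Int)) (r c v : Int) :
    (mset g r c v).map List.length = g.map List.length := by
  cases hl : loc g r c with
  | none => rw [mset_loc_none g r c v hl]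
  | some ij =>
    obtain ⟨i, j⟩ := ij
    obtain ⟨hr, hi, hc, hj⟩ := loc_resolve g r c i j hl
    rw [mset_eq_set g r c v i j hl, List.map_set]
    simp only [List.length_set]
    have hmi : i < (List.map List.length g).length := by simpa using hi
    have : (g[i]?.getD []).length = (List.map List.length g)[i]'hmi := by
      simp [List.getElem?_eq_getElem hi]
    rw [this, List.set_getElem_self hmi]

theorem loc_congr (g g' : List (List Int)) (h : g.map List.length = g'.map List.length)
    (r c : Int) : loc g r c = loc g' r c := by
  have hlen : g.length = g'.length := by
    have := congrArg List.length h; simpa using this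
  have hrow : ∀ i : Nat, (g[i]?.getD []).length = (g'[i]?.getD []).length := by
    intro i
    have h1 : (g.map List.length)[i]? = (g'.map List.length)[i]? := by rw [h]
    simp only [List.getElem?_map] at h1
    cases hg : g[i]? with
    | none =>
      have : i ≥ g.length := by simpa using List.getElem?_eq_none_iff.mp hg
      have : g'[i]? = none := List.getElem?_eq_none_iff.mpr (by omega)
      simp [hg, this]
    | some row =>
      cases hg' : g'[i]? with
      | none =>
        rw [hg, hg'] at h1; simp at h1
      | some row' =>
        rw [hg, hg'] at h1
        simpa using h1
  unfold loc
  rw [hlen]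
  cases PySem.List.pyIdx? g'.length r with
  | none => rfl
  | some i => simp only [Option.bind_some]; rw [hrow i]

theorem mget_mset_self (g : List (List Int)) (r c v : Int) (i j : Nat)
    (h : loc g r c = some (i, j)) : mget (mset g r c v) r c = v := by
  obtain ⟨hr, hi, hc, hj⟩ := loc_resolve g r c i j h
  have hl' : loc (mset g r c v) r c = some (i, j) := by
    rw [loc_congr (mset g r c v) g (mset_shape g r c v) r c]; exact h
  rw [mget_loc _ r c i j hl', mset_eq_set g r c v i j h]
  have : (g.set i ((g[i]?.getD []).set j v))[i]? = some ((g[i]?.getD []).set j v) := by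
    simp [List.getElem?_set_self, hi]
  rw [this]
  simp only [Option.getD_some]
  rw [List.getElem?_set_self (by simpa using hj)]
  simp

theorem mget_mset_other (g : List (List Int)) (r c v p q : Int)
    (h : loc g p q ≠ loc g r c) : mget (mset g r c v) p q = mget g p q := by
  cases hl : loc g r c with
  | none => rw [mset_loc_none g r c v hl]
  | some ij =>
    obtain ⟨i, j⟩ := ij
    obtain ⟨hr, hi, hc, hj⟩ := loc_resolve g r c i j hl
    have hl' : loc (mset g r c v) p q = loc g p q :=
      loc_congr _ _ (mset_shape g r c v) p q
    cases hp : loc g p q with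
    | none =>
      rw [mget_loc_none g p q hp, mget_loc_none _ p q (hl' ▸ hp)]
    | some ij2 =>
      obtain ⟨i2, j2⟩ := ij2
      rw [mget_loc g p q i2 j2 hp, mget_loc _ p q i2 j2 (hl' ▸ hp)]
      rw [mset_eq_set g r c v i j hl]
      rw [hl, hp] at h
      by_cases hii : i = i2
      · subst hii
        have hjj : j ≠ j2 := by intro e; exact h (by rw [e])
        have : (g.set i ((g[i]?.getD []).set j v))[i]? = some ((g[i]?.getD []).set j v) := by
          simp [List.getElem?_set_self, hi]
        rw [this]
        simp only [Option.getD_some]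
        rw [List.getElem?_set_ne hjj]
      · rw [List.getElem?_set_ne hii]

theorem mget_mset_marked (g : List (List Int)) (r c v p q : Int)
    (hm : mget g p q ≠ -1) (hw : mget g r c = -1) :
    mget (mset g r c v) p q = mget g p q := by
  by_cases he : loc g p q = loc g r c
  · exfalso
    cases hl : loc g r c with
    | none => rw [mget_loc_none g r c hl] at hw; omega
    | some ij =>
      obtain ⟨i, j⟩ := ij
      rw [hl] at he
      rw [mget_loc g p q i j he, ← mget_loc g r c i j hl, hw] at hm
      exact hm rfl
  · exact mget_mset_other g r c v p q he

theorem loc_of_mget_neg (g : List (List Int)) (r c : Int) (h : mget g r c = -1) :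
    ∃ i j, loc g r c = some (i, j) := by
  cases hl : loc g r c with
  | none => rw [mget_loc_none g r c hl] at h; omega
  | some ij => exact ⟨ij.1, ij.2, by simpa using hl⟩

theorem cnt_mset (g : List (List Int)) (r c v : Int) (i j : Nat)
    (h : loc g r c = some (i, j)) (hold : mget g r c = -1) (hv : v ≠ -1) :
    cnt (mset g r c v) + 1 = cnt g := by
  obtain ⟨hr, hi, hc, hj⟩ := loc_resolve g r c i j h
  have hrowj : (g[i]?.getD [])[j] = -1 := by
    rw [mget_loc g r c i j h] at hold
    rwa [List.getElem?_eq_getElem hj, Option.getD_some] at hold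
  rw [mset_eq_set g r c v i j h]
  unfold cnt
  rw [List.map_set]
  set L := g.map (fun row => row.count (-1)) with hL
  have hiL : i < L.length := by simpa [hL] using hi
  have hLi : L[i]'hiL = (g[i]?.getD []).count (-1) := by
    simp [hL, List.getElem?_eq_getElem hi]
  have hcount : ((g[i]?.getD []).set j v).count (-1) + 1 = (g[i]?.getD []).count (-1) := by
    rw [List.count_set hj]
    have hmem : (-1 : Int) ∈ g[i]?.getD [] := by
      rw [← hrowj]; exact List.getElem_mem hj
    have hpos : 0 < (g[i]?.getD []).count (-1) := List.count_pos_iff.mpr hmem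
    simp [hrowj, hv]
    omega
  rw [List.sum_set]
  have hsum : L.sum = (L.take i).sum + L[i]'hiL + (L.drop (i + 1)).sum := by
    have := List.sum_set L i (L[i]'hiL)
    rw [List.set_getElem_self hiL] at this
    simpa [hiL] using this
  rw [hsum, hLi]
  simp only [hiL, if_pos]
  omega

theorem nstep_fold_spec (grid : List (List Int)) (m n r c d : Int) (dds : List (Int × Int)) :
    ∀ (dist : List (List Int)) (acc : List (Int × Int)),
      mget dist r c = d → 0 ≤ d →
      ∃ new,
        (dds.foldl (nstep grid m n r c) (dist, acc)).2 = acc ++ new ∧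
        (dds.foldl (nstep grid m n r c) (dist, acc)).1.map List.length = dist.map List.length ∧
        (∀ p q : Int, mget dist p q ≠ -1 →
          mget (dds.foldl (nstep grid m n r c) (dist, acc)).1 p q = mget dist p q) ∧
        (∀ x ∈ new, mget dist x.1 x.2 = -1 ∧
          mget (dds.foldl (nstep grid m n r c) (dist, acc)).1 x.1 x.2 = d + 1) ∧
        new.Nodup ∧
        cnt (dds.foldl (nstep grid m n r c) (dist, acc)).1 + new.length = cnt dist := by
  induction dds with
  | nil =>
    intro dist acc hd hd0
    exact ⟨[], by simp, rfl, fun p q h => rfl, by simp, List.nodup_nil, by simp⟩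
  | cons dd dds ih =>
    intro dist acc hd hd0
    rw [List.foldl_cons]
    by_cases hcond : 0 ≤ r + dd.1 ∧ r + dd.1 < m ∧ 0 ≤ c + dd.2 ∧ c + dd.2 < n ∧
        mget grid (r + dd.1) (c + dd.2) ≠ 0 ∧ mget dist (r + dd.1) (c + dd.2) = -1
    · have hstep : nstep grid m n r c (dist, acc) dd =
          (mset dist (r + dd.1) (c + dd.2) (d + 1), acc ++ [(r + dd.1, c + dd.2)]) := by
        simp only [nstep, hd]
        rw [if_pos hcond]
      set nr := r + dd.1
      set nc := c + dd.2
      have hneg : mget dist nr nc = -1 := hcond.2.2.2.2.2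
      obtain ⟨i, j, hloc⟩ := loc_of_mget_neg dist nr nc hneg
      set dist₁ := mset dist nr nc (d + 1) with hdist₁
      have hpres : ∀ p q : Int, mget dist p q ≠ -1 → mget dist₁ p q = mget dist p q :=
        fun p q hpq => mget_mset_marked dist nr nc (d + 1) p q hpq hneg
      have hd₁ : mget dist₁ r c = d := by
        rw [hpres r c (by omega)]; exact hd
      obtain ⟨new', hA1, hA2, hA3, hA4, hA5, hA6⟩ :=
        ih dist₁ (acc ++ [(nr, nc)]) hd₁ hd0
      rw [hstep]
      refine ⟨(nr, nc) :: new', ?_, ?_, ?_, ?_, ?_, ?_⟩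
      · rw [hA1]; simp
      · rw [hA2]; exact mset_shape dist nr nc (d + 1)
      · intro p q hpq
        rw [hA3 p q (by rw [hpres p q hpq]; exact hpq), hpres p q hpq]
      · intro x hx
        rcases List.mem_cons.mp hx with rfl | hx
        · constructor
          · exact hneg
          · rw [hA3 nr nc (by rw [mget_mset_self dist nr nc (d+1) i j hloc]; omega)]
            exact mget_mset_self dist nr nc (d + 1) i j hloc
        · obtain ⟨h1, h2⟩ := hA4 x hx
          constructor
          · by_contra hne
            rw [hpres x.1 x.2 hne] at h1
            exact hne h1
          · exact h2
      · refine List.Nodup.cons ?_ hA5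
        intro hmem
        have := (hA4 (nr, nc) hmem).1
        rw [mget_mset_self dist nr nc (d + 1) i j hloc] at this
        omega
      · have hc1 : cnt dist₁ + 1 = cnt dist :=
          cnt_mset dist nr nc (d + 1) i j hloc hneg (by omega)
        simp only [List.length_cons]
        omega
    · have hstep : nstep grid m n r c (dist, acc) dd = (dist, acc) := by
        simp only [nstep]
        rw [if_neg hcond]
      rw [hstep]
      exact ih dist acc hd hd0

theorem cellStep_acc (grid : List (List Int)) (m n lo hi : Int)
    (dist : List (List Int)) (a : List (Int × Int)) (b : List (Int × Int × Int))
    (x : Int × Int) :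
    cellStep grid m n lo hi (dist, a, b) x =
      ((cellStep grid m n lo hi (dist, [], []) x).1,
       a ++ (cellStep grid m n lo hi (dist, [], []) x).2.1,
       b ++ (cellStep grid m n lo hi (dist, [], []) x).2.2) := by
  simp only [cellStep]
  split_ifs <;> simp

theorem foldl_cellStep_acc (grid : List (List Int)) (m n lo hi : Int)
    (frontier : List (Int × Int)) :
    ∀ (dist : List (List Int)) (a : List (Int × Int)) (b : List (Int × Int × Int)),
      frontier.foldl (cellStep grid m n lo hi) (dist, a, b) =
        ((frontier.foldl (cellStep grid m n lo hi) (dist, [], [])).1,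
         a ++ (frontier.foldl (cellStep grid m n lo hi) (dist, [], [])).2.1,
         b ++ (frontier.foldl (cellStep grid m n lo hi) (dist, [], [])).2.2) := by
  induction frontier with
  | nil => intro dist a b; simp
  | cons x fs ih =>
    intro dist a b
    rw [List.foldl_cons, List.foldl_cons]
    rw [cellStep_acc]
    set C := cellStep grid m n lo hi (dist, [], []) x with hC
    rw [ih C.1 (a ++ C.2.1) (b ++ C.2.2), ih C.1 C.2.1 C.2.2]
    simp

theorem processLayer_spec (grid : List (List Int)) (m n lo hi d : Int)
    (frontier : List (Int × Int)) :
    ∀ (dist : List (List Int)),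
      (∀ x ∈ frontier, mget dist x.1 x.2 = d) → 0 ≤ d →
      (processLayer grid m n lo hi dist frontier).2.2 =
          (frontier.filter (fun x => decide ((1 < mget grid x.1 x.2 ∧ lo ≤ mget grid x.1 x.2 ∧ mget grid x.1 x.2 ≤ hi)))).map
            (fun x => (mget grid x.1 x.2, x.1, x.2)) ∧
      (∀ p q : Int, mget dist p q ≠ -1 →
        mget (processLayer grid m n lo hi dist frontier).1 p q = mget dist p q) ∧
      (∀ x ∈ (processLayer grid m n lo hi dist frontier).2.1,
        mget dist x.1 x.2 = -1 ∧
        mget (processLayer grid m n lo hi dist frontier).1 x.1 x.2 = d + 1) ∧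
      (processLayer grid m n lo hi dist frontier).2.1.Nodup ∧
      cnt (processLayer grid m n lo hi dist frontier).1 +
        (processLayer grid m n lo hi dist frontier).2.1.length = cnt dist := by
  induction frontier with
  | nil =>
    intro dist hf hd0
    exact ⟨rfl, fun p q h => rfl, by simp [processLayer], by simp [processLayer], by simp [processLayer]⟩
  | cons x fs ih =>
    intro dist hf hd0
    have hdx : mget dist x.1 x.2 = d := hf x (by simp)
    obtain ⟨new, hN1, hN2, hN3, hN4, hN5, hN6⟩ :=
      nstep_fold_spec grid m n x.1 x.2 d dirs dist [] hdx hd0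
    have hnb2 : (nbrs grid m n x.1 x.2 dist).2 = new := by
      simpa [nbrs] using hN1
    have hcell : cellStep grid m n lo hi (dist, [], []) x =
        ((nbrs grid m n x.1 x.2 dist).1, new,
         if (1 < mget grid x.1 x.2 ∧ lo ≤ mget grid x.1 x.2 ∧ mget grid x.1 x.2 ≤ hi) then [(mget grid x.1 x.2, x.1, x.2)] else []) := by
      simp only [cellStep]
      split_ifs <;> simp [hnb2]
    set nb1 := (nbrs grid m n x.1 x.2 dist).1 with hnb1
    have hnbfacts : (∀ p q : Int, mget dist p q ≠ -1 → mget nb1 p q = mget dist p q) ∧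
        (∀ y ∈ new, mget dist y.1 y.2 = -1 ∧ mget nb1 y.1 y.2 = d + 1) ∧
        new.Nodup ∧ cnt nb1 + new.length = cnt dist := by
      exact ⟨hN3, hN4, hN5, hN6⟩
    obtain ⟨hP, hM, hD, hC⟩ := hnbfacts
    have hf' : ∀ y ∈ fs, mget nb1 y.1 y.2 = d := by
      intro y hy
      rw [hP y.1 y.2 (by rw [hf y (by simp [hy])]; omega)]
      exact hf y (by simp [hy])
    obtain ⟨iB1, iB3, iB4, iB5, iB6⟩ := ih nb1 hf' hd0
    have hunf : processLayer grid m n lo hi dist (x :: fs) =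
        ((processLayer grid m n lo hi nb1 fs).1,
         new ++ (processLayer grid m n lo hi nb1 fs).2.1,
         (if (1 < mget grid x.1 x.2 ∧ lo ≤ mget grid x.1 x.2 ∧ mget grid x.1 x.2 ≤ hi) then [(mget grid x.1 x.2, x.1, x.2)] else []) ++
           (processLayer grid m n lo hi nb1 fs).2.2) := by
      show (x :: fs).foldl (cellStep grid m n lo hi) (dist, [], []) = _
      rw [List.foldl_cons, hcell]
      exact foldl_cellStep_acc grid m n lo hi fs nb1 _ _
    set F := processLayer grid m n lo hi nb1 fs with hF
    refine ⟨?_, ?_, ?_, ?_, ?_⟩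
    · rw [hunf]
      simp only [List.filter_cons, List.map_cons]
      by_cases hcand : (1 < mget grid x.1 x.2 ∧ lo ≤ mget grid x.1 x.2 ∧ mget grid x.1 x.2 ≤ hi)
      · simp [hcand, iB1]
      · simp [hcand, iB1]
    · intro p q hpq
      rw [hunf]
      simp only
      rw [iB3 p q (by rw [hP p q hpq]; exact hpq), hP p q hpq]
    · intro y hy
      rw [hunf] at hy ⊢
      simp only [List.mem_append] at hy
      rcases hy with hy | hy
      · obtain ⟨h1, h2⟩ := hM y hy
        exact ⟨h1, by rw [iB3 y.1 y.2 (by rw [h2]; omega)]; exact h2⟩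
      · obtain ⟨h1, h2⟩ := iB4 y hy
        refine ⟨?_, h2⟩
        by_contra hne
        rw [hP y.1 y.2 hne] at h1
        exact hne h1
    · rw [hunf]
      simp only
      refine List.Nodup.append hD iB5 ?_
      intro y hy1 hy2
      have := (hM y hy1).2
      have := (iB4 y hy2).1
      omega
    · rw [hunf]
      simp only [List.length_append]
      omega

theorem bfsA_nil (grid : List (List Int)) (m n lo hi : Int) (f : Nat)
    (dist : List (List Int)) (cands : List (Int × Int × Int × Int)) :
    bfsA grid m n lo hi f dist [] cands = cands := by
  cases f <;> rfl

theorem bfsA_layer (grid : List (List Int)) (m n lo hi d : Int)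
    (L : List (Int × Int)) :
    ∀ (R : List (Int × Int)) (dist : List (List Int))
      (cands : List (Int × Int × Int × Int)) (f : Nat),
      (∀ x ∈ L, mget dist x.1 x.2 = d) → 0 ≤ d →
      bfsA grid m n lo hi (L.length + f) dist (L ++ R) cands =
        bfsA grid m n lo hi f (processLayer grid m n lo hi dist L).1
          (R ++ (processLayer grid m n lo hi dist L).2.1)
          (cands ++ ((L.filter (fun x => decide ((1 < mget grid x.1 x.2 ∧ lo ≤ mget grid x.1 x.2 ∧ mget grid x.1 x.2 ≤ hi)))).map
            (fun x => (d, mget grid x.1 x.2, x.1, x.2)))) := by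
  induction L with
  | nil =>
    intro R dist cands f hL hd0
    simp [processLayer]
  | cons x L' ih =>
    intro R dist cands f hL hd0
    have hdx : mget dist x.1 x.2 = d := hL x (by simp)
    obtain ⟨new, hN1, hN2, hN3, hN4, hN5, hN6⟩ :=
      nstep_fold_spec grid m n x.1 x.2 d dirs dist [] hdx hd0
    have hnb2 : (nbrs grid m n x.1 x.2 dist).2 = new := by simpa [nbrs] using hN1
    set nb1 := (nbrs grid m n x.1 x.2 dist).1 with hnb1
    have hstep : bfsA grid m n lo hi (L'.length + f + 1) dist ((x :: L') ++ R) cands =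
        bfsA grid m n lo hi (L'.length + f) nb1 ((L' ++ R) ++ new)
          (cands ++ (if (1 < mget grid x.1 x.2 ∧ lo ≤ mget grid x.1 x.2 ∧ mget grid x.1 x.2 ≤ hi)
            then [(d, mget grid x.1 x.2, x.1, x.2)] else [])) := by
      obtain ⟨r, c⟩ := x
      show bfsA grid m n lo hi (L'.length + f + 1) dist ((r, c) :: (L' ++ R)) cands = _
      simp only [bfsA, hnb2, hdx]
      split_ifs <;> simp [hnb2, hnb1]
    have hlen : (x :: L').length + f = L'.length + f + 1 := by simp; omega
    rw [hlen, hstep]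
    have hP : ∀ p q : Int, mget dist p q ≠ -1 → mget nb1 p q = mget dist p q := hN3
    have hf' : ∀ y ∈ L', mget nb1 y.1 y.2 = d := by
      intro y hy
      rw [hP y.1 y.2 (by rw [hL y (by simp [hy])]; omega)]
      exact hL y (by simp [hy])
    rw [List.append_assoc L' R new]
    rw [ih (R ++ new) nb1 _ f hf' hd0]
    have hcell : cellStep grid m n lo hi (dist, [], []) x =
        ((nbrs grid m n x.1 x.2 dist).1, new,
          if (1 < mget grid x.1 x.2 ∧ lo ≤ mget grid x.1 x.2 ∧ mget grid x.1 x.2 ≤ hi) then [(mget grid x.1 x.2, x.1, x.2)] else []) := by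
      simp only [cellStep]
      split_ifs <;> simp [hnb2]
    have hunf : processLayer grid m n lo hi dist (x :: L') =
        ((processLayer grid m n lo hi nb1 L').1,
         new ++ (processLayer grid m n lo hi nb1 L').2.1,
         (if (1 < mget grid x.1 x.2 ∧ lo ≤ mget grid x.1 x.2 ∧ mget grid x.1 x.2 ≤ hi) then [(mget grid x.1 x.2, x.1, x.2)] else []) ++
           (processLayer grid m n lo hi nb1 L').2.2) := by
      show (x :: L').foldl (cellStep grid m n lo hi) (dist, [], []) = _
      rw [List.foldl_cons, hcell]
      exact foldl_cellStep_acc grid m n lo hi L' nb1 _ _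
    rw [hunf]
    simp only [List.filter_cons]
    by_cases hcand : (1 < mget grid x.1 x.2 ∧ lo ≤ mget grid x.1 x.2 ∧ mget grid x.1 x.2 ≤ hi)
    · simp [hcand] <;> exact hnb1.symm
    · simp [hcand] <;> exact hnb1.symm

def ghost (grid : List (List Int)) (m n lo hi : Int) :
    Nat → List (List Int) → List (Int × Int) → List (List (Int × Int × Int))
  | 0, _, _ => []
  | fuel + 1, dist, frontier =>
    if frontier.isEmpty then []
    else
      (processLayer grid m n lo hi dist frontier).2.2 ::
        ghost grid m n lo hi fuel (processLayer grid m n lo hi dist frontier).1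
          (processLayer grid m n lo hi dist frontier).2.1

def tagW : Int → List (List (Int × Int × Int)) → List (Int × Int × Int × Int)
  | _, [] => []
  | d, L :: Ls => L.map (fun t => (d, t)) ++ tagW (d + 1) Ls

theorem mem_tagW (Ls : List (List (Int × Int × Int))) :
    ∀ (d : Int) (x : Int × Int × Int × Int), x ∈ tagW d Ls → d ≤ x.1 := by
  induction Ls with
  | nil => intro d x hx; simp [tagW] at hx
  | cons L Ls ih =>
    intro d x hx
    rcases List.mem_append.mp hx with hx | hx
    · obtain ⟨t, _, rfl⟩ := List.mem_map.mp hx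
      simp
    · have := ih (d + 1) x hx
      omega

theorem key4_tag_lt (d : Int) (a b : Int × Int × Int) :
    key4 (d, a) < key4 (d, b) ↔ key3 a < key3 b := by
  show toLex (d, key3 a) < toLex (d, key3 b) ↔ key3 a < key3 b
  rw [Prod.Lex.toLex_lt_toLex]
  simp

theorem key4_tag_lt_of_fst (a b : Int × Int × Int × Int) (h : a.1 < b.1) :
    key4 a < key4 b := by
  show toLex (a.1, toLex (a.2.1, toLex (a.2.2.1, a.2.2.2))) <
    toLex (b.1, toLex (b.2.1, toLex (b.2.2.1, b.2.2.2)))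
  rw [Prod.Lex.toLex_lt_toLex]
  exact Or.inl h

theorem key3_inj : Function.Injective key3 := by
  intro a b h
  unfold key3 at h
  have := congrArg ofLex h
  simp at this
  obtain ⟨h1, h2⟩ := this
  have h3 := congrArg ofLex h2
  simp at h3
  exact Prod.ext h1 h3

theorem tagW_map_proj (Ls : List (List (Int × Int × Int))) :
    ∀ d : Int, (tagW d Ls).map (fun t => [t.2.2.1, t.2.2.2]) =
      (Ls.map (fun L => L.map (fun t => [t.2.1, t.2.2]))).flatten := by
  induction Ls with
  | nil => intro d; simp [tagW]
  | cons L Ls ih =>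
    intro d
    show (L.map (fun t => ((d : Int), t)) ++ tagW (d + 1) Ls).map _ = _
    rw [List.map_append, ih (d + 1)]
    simp [List.map_map, Function.comp_def]

theorem slice_to_map {α β : Type} (f : α → β) (xs : List α) (b : Int) :
    PySem.List.slice (xs.map f) none (some b) = (PySem.List.slice xs none (some b)).map f := by
  show List.take _ (List.drop 0 (xs.map f)) = (List.take _ (List.drop 0 xs)).map f
  simp [List.map_take, PySem.List.clampIdx]

theorem items_nodup (grid : List (List Int)) (lo hi : Int) (frontier : List (Int × Int))
    (h : frontier.Nodup) :
    ((frontier.filter (fun x => decide ((1 < mget grid x.1 x.2 ∧ lo ≤ mget grid x.1 x.2 ∧ mget grid x.1 x.2 ≤ hi)))).map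
      (fun x => (mget grid x.1 x.2, x.1, x.2))).Nodup := by
  refine List.Nodup.map ?_ (List.Nodup.filter _ h)
  intro a b hab
  have h2 := congrArg (fun t : Int × Int × Int => t.2) hab
  simp at h2
  exact h2

theorem sorted_key3_pairwise_lt (its : List (Int × Int × Int)) (h : its.Nodup) :
    (PySem.List.sorted its key3).Pairwise (fun a b => key3 a < key3 b) := by
  have hle := PySem.List.sorted_pairwise its key3
  have hnd : (PySem.List.sorted its key3).Nodup :=
    (PySem.List.sorted_perm its key3 false).nodup_iff.mpr h
  have := List.Pairwise.and hle hnd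
  refine this.imp ?_
  rintro a b ⟨h1, h2⟩
  exact lt_of_le_of_ne h1 (fun e => h2 (key3_inj e))

theorem mainSim (grid : List (List Int)) (m n lo hi : Int) :
    ∀ (fB : Nat) (dist : List (List Int)) (frontier : List (Int × Int)) (d : Int)
      (cands : List (Int × Int × Int × Int)) (res : List (List Int)) (fA : Nat),
      0 ≤ d → (∀ x ∈ frontier, mget dist x.1 x.2 = d) → frontier.Nodup →
      fA ≥ frontier.length + cnt dist + 1 →
      (frontier = [] ∨ fB ≥ 1 + cnt dist) →
      bfsA grid m n lo hi fA dist frontier cands =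
          cands ++ tagW d (ghost grid m n lo hi fB dist frontier) ∧
      layersB grid m n lo hi fB dist frontier res =
          res ++ ((ghost grid m n lo hi fB dist frontier).map
            (fun its => (PySem.List.sorted its key3).map (fun t => [t.2.1, t.2.2]))).flatten ∧
      List.Pairwise (fun a b => key4 a < key4 b)
        (tagW d ((ghost grid m n lo hi fB dist frontier).map
          (fun its => PySem.List.sorted its key3))) ∧
      (tagW d ((ghost grid m n lo hi fB dist frontier).map
          (fun its => PySem.List.sorted its key3))).Perm
        (tagW d (ghost grid m n lo hi fB dist frontier)) := by
  intro fB
  induction fB with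
  | zero =>
    intro dist frontier d cands res fA hd0 hf hnd hfA hfB
    have hfe : frontier = [] := by
      rcases hfB with h | h
      · exact h
      · omega
    subst hfe
    refine ⟨?_, ?_, ?_, ?_⟩
    · rw [bfsA_nil]; simp [ghost, tagW]
    · simp [layersB, ghost]
    · simp [ghost, tagW]
    · simp [ghost, tagW]
  | succ f ih =>
    intro dist frontier d cands res fA hd0 hf hnd hfA hfB
    by_cases hfe : frontier = []
    · subst hfe
      refine ⟨?_, ?_, ?_, ?_⟩
      · rw [bfsA_nil]; simp [ghost, tagW]
      · simp [layersB, ghost, tagW]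
      · simp [ghost, tagW]
      · simp [ghost, tagW]
    · have hfB' : f + 1 ≥ 1 + cnt dist := by
        rcases hfB with h | h
        · exact absurd h hfe
        · exact h
      obtain ⟨hB1, hB3, hB4, hB5, hB6⟩ := processLayer_spec grid m n lo hi d frontier dist hf hd0
      set pl := processLayer grid m n lo hi dist frontier with hpl
      set its := pl.2.2 with hits
      set nxt := pl.2.1 with hnxt
      -- items are the candidate triples of the layer
      have hitsnd : its.Nodup := by
        have h0 := items_nodup grid lo hi frontier hnd
        rw [← hB1] at h0
        exact h0
      have hghost : ghost grid m n lo hi (f + 1) dist frontier =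
          its :: ghost grid m n lo hi f pl.1 nxt := by
        show (if frontier.isEmpty then [] else _) = _
        rw [if_neg (by simpa [List.isEmpty_iff] using hfe)]
      -- IH instantiation
      have hihyp1 : ∀ x ∈ nxt, mget pl.1 x.1 x.2 = d + 1 := fun x hx => (hB4 x hx).2
      have hfA' : fA - frontier.length ≥ nxt.length + cnt pl.1 + 1 := by omega
      have hfB'' : nxt = [] ∨ f ≥ 1 + cnt pl.1 := by
        by_cases hne : nxt = []
        · exact Or.inl hne
        · right
          have : nxt.length ≥ 1 := by
            cases hxx : nxt with
            | nil => exact absurd hxx hne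
            | cons a b => simp [hxx]
          omega
      obtain ⟨ia, ib, ic, id'⟩ := ih pl.1 nxt (d + 1) (cands ++ its.map (fun t => (d, t)))
        (res ++ (PySem.List.sorted its key3).map (fun t => [t.2.1, t.2.2]))
        (fA - frontier.length) (by omega) hihyp1 hB5 hfA' hfB''
      refine ⟨?_, ?_, ?_, ?_⟩
      · -- A side
        have hsplit : fA = frontier.length + (fA - frontier.length) := by omega
        rw [hsplit]
        have := bfsA_layer grid m n lo hi d frontier [] dist cands (fA - frontier.length) hf hd0
        rw [show frontier ++ ([] : List (Int × Int)) = frontier from by simp] at this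
        rw [this]
        have htag : (frontier.filter (fun x => decide ((1 < mget grid x.1 x.2 ∧ lo ≤ mget grid x.1 x.2 ∧ mget grid x.1 x.2 ≤ hi)))).map
            (fun x => ((d : Int), mget grid x.1 x.2, x.1, x.2)) = its.map (fun t => (d, t)) := by
          rw [hB1, List.map_map]
          rfl
        rw [htag]
        show bfsA grid m n lo hi (fA - frontier.length) pl.1 ([] ++ nxt) _ = _
        rw [List.nil_append, ia, hghost]
        show _ = cands ++ (its.map (fun t => ((d : Int), t)) ++ _)
        rw [← List.append_assoc]
      · -- B side
        have hlB : layersB grid m n lo hi (f + 1) dist frontier res =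
            layersB grid m n lo hi f pl.1 nxt
              (res ++ (PySem.List.sorted its key3).map (fun t => [t.2.1, t.2.2])) := by
          show (if frontier.isEmpty then res else _) = _
          rw [if_neg (by simpa [List.isEmpty_iff] using hfe)]
        rw [hlB, ib, hghost]
        simp [List.append_assoc]
      · -- pairwise
        rw [hghost]
        show List.Pairwise _ ((PySem.List.sorted its key3).map (fun t => ((d : Int), t)) ++ _)
        rw [List.pairwise_append]
        refine ⟨?_, ic, ?_⟩
        · rw [List.pairwise_map]
          refine (sorted_key3_pairwise_lt its hitsnd).imp ?_
          intro a b hab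
          exact (key4_tag_lt d a b).mpr hab
        · intro a ha b hb
          obtain ⟨t, _, rfl⟩ := List.mem_map.mp ha
          have hb1 := mem_tagW _ (d + 1) b hb
          exact key4_tag_lt_of_fst _ _ (by simp; omega)
      · -- perm
        rw [hghost]
        show ((PySem.List.sorted its key3).map (fun t => ((d : Int), t)) ++ _).Perm
          (its.map (fun t => ((d : Int), t)) ++ _)
        exact List.Perm.append ((PySem.List.sorted_perm its key3 false).map _) id'

theorem pyIdx?_of_InRange {nn : Nat} {i : Int} (h : PySem.Raise.InRange nn i) :
    ∃ k, PySem.List.pyIdx? nn i = some k := by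
  unfold PySem.Raise.InRange at h
  unfold PySem.List.pyIdx?
  split_ifs <;> first | exact ⟨_, rfl⟩ | (exfalso; omega)

theorem final_eq (grid : List (List Int)) (pricing : List Int) (start : List Int) (k : Int)
    (hpre : Pre_highestRankedKItems grid pricing start k) :
    highestRankedKItems grid pricing start k = highestRankedKItems_alt grid pricing start k := by
  obtain ⟨hne, hrect, hN1, hp2, hs2, hsr, hsc⟩ := hpre
  set m : Int := (grid.length : Int) with hm
  set n : Int := (((PySem.List.pyGet? grid 0).getD []).length : Int) with hn
  set lo := PySem.List.pyGetD pricing 0 0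
  set hi := PySem.List.pyGetD pricing 1 0
  set sr := PySem.List.pyGetD start 0 0 with hsrdef
  set sc := PySem.List.pyGetD start 1 0 with hscdef
  show (if mget grid sr sc = 0 then ([] : List (List Int)) else _) =
    (if mget grid sr sc = 0 then ([] : List (List Int)) else _)
  by_cases h0 : mget grid sr sc = 0
  · rw [if_pos h0, if_pos h0]
  · rw [if_neg h0, if_neg h0]
    set dist0 := List.replicate m.toNat (List.replicate n.toNat (-1 : Int)) with hdist0
    set dist1 := mset dist0 sr sc 0 with hdist1
    -- resolve the start cell in dist0
    obtain ⟨ir, hir⟩ := pyIdx?_of_InRange hsr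
    obtain ⟨jc, hjc⟩ := pyIdx?_of_InRange hsc
    have hlen0 : dist0.length = grid.length := by simp [hdist0, hm]
    have hirlt : ir < grid.length := pyIdx?_lt hir
    have hrow0 : dist0[ir]?.getD [] = List.replicate n.toNat (-1 : Int) := by
      rw [hdist0]
      rw [List.getElem?_eq_getElem (by simp [hm]; omega)]
      simp
    have hloc0 : loc dist0 sr sc = some (ir, jc) := by
      unfold loc
      rw [hlen0, hir]
      simp only [Option.bind_some]
      rw [hrow0]
      have : (List.replicate n.toNat (-1 : Int)).length = n.toNat := by simp
      rw [this]
      have hnt : n.toNat = ((PySem.List.pyGet? grid 0).getD []).length := by simp [hn]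
      rw [hnt, hjc]
      rfl
    have hjclt : jc < n.toNat := by
      have h := pyIdx?_lt hjc
      simp [hn]
      omega
    have hold0 : mget dist0 sr sc = -1 := by
      rw [mget_loc dist0 sr sc ir jc hloc0, hrow0]
      rw [List.getElem?_eq_getElem (by simpa using hjclt)]
      simp
    have hd1 : mget dist1 sr sc = 0 := mget_mset_self dist0 sr sc 0 ir jc hloc0
    have hcnt0 : cnt dist0 = m.toNat * n.toNat := by
      unfold cnt
      rw [hdist0]
      simp [List.map_replicate, List.count_replicate]
    have hcnt1 : cnt dist1 + 1 = m.toNat * n.toNat := by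
      rw [hdist1, ← hcnt0]
      exact cnt_mset dist0 sr sc 0 ir jc hloc0 hold0 (by omega)
    obtain ⟨ha, hb, hc, hd⟩ := mainSim grid m n lo hi (m.toNat * n.toNat + 1) dist1
      [(sr, sc)] 0 [] [] (m.toNat * n.toNat + 1) (by omega)
      (by intro x hx; simp at hx; subst hx; exact hd1) (by simp)
      (by simp; omega) (by right; omega)
    set G := ghost grid m n lo hi (m.toNat * n.toNat + 1) dist1 [(sr, sc)] with hG
    rw [ha, hb]
    simp only [List.nil_append]
    have hsorted : PySem.List.sorted (tagW 0 G) key4 =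
        tagW 0 (G.map (fun its => PySem.List.sorted its key3)) :=
      PySem.List.sorted_eq_of_perm_of_pairwise_lt _ _ key4 hd hc
    rw [hsorted]
    rw [← slice_to_map]
    rw [tagW_map_proj]
    rw [List.map_map]
    rfl

-- ===== VERDICT (by name: the statement is the Claim_ definition above) =====
theorem highestRankedKItems_spec : Claim_equal_highestRankedKItems := by
  intro grid pricing start k _ hpre
  simp only [Spec_highestRankedKItems]
  exact final_eq grid pricing start k hpre
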